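-- pv_equiv track=rewrite | github.com/Arsen1302/Code-copy-detector | TestData/solutions/problem_1078_5.py | solution_1078_5
-- ===== SOURCE A (Python) =====
-- from typing import List
--
-- def solution_1078_5(grid: List[List[int]]) -> int:
--     numRows, numCols = len(grid), len(grid[0])
--     maxProduct, minProduct = [[0] * numCols for _ in range(numRows)], [[0] * numCols for _ in range(numRows)]
--     maxProduct[0][0], minProduct[0][0] = grid[0][0], grid[0][0]
--     for row in range(1, numRows):
--         minProduct[row][0] = minProduct[row - 1][0] * grid[row][0]
--         maxProduct[row][0] = maxProduct[row - 1][0] * grid[row][0]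
--     for col in range(1, numCols):
--         minProduct[0][col] = minProduct[0][col - 1] * grid[0][col]
--         maxProduct[0][col] = maxProduct[0][col - 1] * grid[0][col]
--     for row in range(1, numRows):
--         for col in range(1, numCols):
--             if grid[row][col] < 0:
--                 maxProduct[row][col] = min(minProduct[row - 1][col], minProduct[row][col - 1]) * grid[row][col]
--                 minProduct[row][col] = max(maxProduct[row - 1][col], maxProduct[row][col - 1]) * grid[row][col]
--             else:
--                 maxProduct[row][col] = max(maxProduct[row - 1][col], maxProduct[row][col - 1]) * grid[row][col]
--                 minProduct[row][col] = min(minProduct[row - 1][col], minProduct[row][col - 1]) * grid[row][col]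
--     res = maxProduct[numRows - 1][numCols - 1]
--     return res % 1000000007 if res >= 0 else -1
-- ===== SOURCE B (Python) =====
-- def solution_1078_5(grid):
--     # Top-down, demand-driven evaluation: resolve the (max, min) path-product
--     # pair of each needed cell with an explicit work stack and a memo dict,
--     # starting from the bottom-right corner (no recursion, no full tables).
--     numRows, numCols = len(grid), len(grid[0])
--     memo = {}
--     stack = [(numRows - 1, numCols - 1)]
--     while stack:
--         r, c = stack[-1]
--         if (r, c) in memo:
--             stack.pop()
--             continue
--         if r == 0 and c == 0:
--             memo[(0, 0)] = (grid[0][0], grid[0][0])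
--             stack.pop()
--             continue
--         deps = ([(r - 1, c)] if r > 0 else []) + ([(r, c - 1)] if c > 0 else [])
--         missing = [d for d in deps if d not in memo]
--         if missing:
--             stack.extend(missing)
--             continue
--         g = grid[r][c]
--         hi = max(memo[d][0] for d in deps)
--         lo = min(memo[d][1] for d in deps)
--         memo[(r, c)] = (lo * g, hi * g) if g < 0 else (hi * g, lo * g)
--         stack.pop()
--     best = memo[(numRows - 1, numCols - 1)][0]
--     return best % 1000000007 if best >= 0 else -1
-- ===== Notes on version B (the rewrite author's own statement) =====
-- stated objective: alternative
-- what changed: Replaces A's bottom-up fill of two full rows*cols DP tables in three staged loops by a top-down, demand-driven memoized evaluation: an explicit work stack resolves the (max,min) path-product pair of each needed cell into a dict, starting from the bottom-right corner.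
import Mathlib
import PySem

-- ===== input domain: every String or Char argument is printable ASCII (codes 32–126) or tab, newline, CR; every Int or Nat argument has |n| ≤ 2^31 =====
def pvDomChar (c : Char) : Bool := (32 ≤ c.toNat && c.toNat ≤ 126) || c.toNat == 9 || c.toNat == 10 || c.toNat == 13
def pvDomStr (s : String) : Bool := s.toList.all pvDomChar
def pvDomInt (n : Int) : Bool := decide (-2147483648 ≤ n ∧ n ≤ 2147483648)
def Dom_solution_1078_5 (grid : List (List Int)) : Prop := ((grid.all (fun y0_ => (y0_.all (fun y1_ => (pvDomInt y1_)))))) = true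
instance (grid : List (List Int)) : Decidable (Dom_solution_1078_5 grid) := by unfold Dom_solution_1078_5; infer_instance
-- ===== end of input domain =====

-- B replaces A's bottom-up fill of two full 2-D DP tables (three staged loops) by a
-- top-down memoized recursion f(r,c) returning the (max,min) path-product pair, evaluated
-- on demand from the bottom-right corner: a different decomposition, same asymptotic cost.

-- ===== PORT A =====
-- 2-D table access/update helpers (Python list-of-lists indexing/assignment; all indices
-- used are in range under Pre_, so getD/set are exact there).
def pvGet2 (t : List (List Int)) (r c : Nat) : Int := (t.getD r []).getD c 0

def pvSet2 (t : List (List Int)) (r c : Nat) (v : Int) : List (List Int) :=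
  t.set r ((t.getD r []).set c v)

-- body of 'for row in range(1, numRows)' (column-0 fill); Python updates minProduct then maxProduct
def pvStepCol (grid : List (List Int)) (st : List (List Int) × List (List Int)) (row : Nat) :
    List (List Int) × List (List Int) :=
  let mn' := pvSet2 st.2 row 0 (pvGet2 st.2 (row - 1) 0 * pvGet2 grid row 0)
  let mx' := pvSet2 st.1 row 0 (pvGet2 st.1 (row - 1) 0 * pvGet2 grid row 0)
  (mx', mn')

-- body of 'for col in range(1, numCols)' (row-0 fill)
def pvStepRow (grid : List (List Int)) (st : List (List Int) × List (List Int)) (col : Nat) :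
    List (List Int) × List (List Int) :=
  let mn' := pvSet2 st.2 0 col (pvGet2 st.2 0 (col - 1) * pvGet2 grid 0 col)
  let mx' := pvSet2 st.1 0 col (pvGet2 st.1 0 (col - 1) * pvGet2 grid 0 col)
  (mx', mn')

-- body of the interior double loop at (row, col); in the negative branch Python reads
-- maxProduct AFTER its (row,col) update, so mn' reads mx'
def pvStepCell (grid : List (List Int)) (row : Nat) (st : List (List Int) × List (List Int))
    (col : Nat) : List (List Int) × List (List Int) :=
  let g := pvGet2 grid row col
  if g < 0 then
    let mx' := pvSet2 st.1 row col (min (pvGet2 st.2 (row - 1) col) (pvGet2 st.2 row (col - 1)) * g)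
    let mn' := pvSet2 st.2 row col (max (pvGet2 mx' (row - 1) col) (pvGet2 mx' row (col - 1)) * g)
    (mx', mn')
  else
    let mx' := pvSet2 st.1 row col (max (pvGet2 st.1 (row - 1) col) (pvGet2 st.1 row (col - 1)) * g)
    let mn' := pvSet2 st.2 row col (min (pvGet2 st.2 (row - 1) col) (pvGet2 st.2 row (col - 1)) * g)
    (mx', mn')

-- one iteration of the outer interior loop: the whole inner 'for col in range(1, numCols)'
def pvStepIRow (grid : List (List Int)) (numCols : Nat)
    (st : List (List Int) × List (List Int)) (row : Nat) :
    List (List Int) × List (List Int) :=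
  (List.range' 1 (numCols - 1)).foldl (pvStepCell grid row) st

-- Python range(1, k) over nonnegative bounds is exactly List.range' 1 (k-1) (Nat indices).
def solution_1078_5 (grid : List (List Int)) : Int :=
  let numRows := grid.length
  let numCols := grid.headI.length
  let maxP0 := List.replicate numRows (List.replicate numCols (0 : Int))
  let minP0 := List.replicate numRows (List.replicate numCols (0 : Int))
  let maxP1 := pvSet2 maxP0 0 0 (pvGet2 grid 0 0)
  let minP1 := pvSet2 minP0 0 0 (pvGet2 grid 0 0)
  let st2 := (List.range' 1 (numRows - 1)).foldl (pvStepCol grid) (maxP1, minP1)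
  let st3 := (List.range' 1 (numCols - 1)).foldl (pvStepRow grid) st2
  let st4 := (List.range' 1 (numRows - 1)).foldl (pvStepIRow grid numCols) st3
  let res := pvGet2 st4.1 (numRows - 1) (numCols - 1)
  if res ≥ 0 then PySem.Int.mod res 1000000007 else -1

-- ===== PORT B =====
-- Source B's deps list: '[(r-1,c)] if r > 0 else []' + '[(r,c-1)] if c > 0 else []'
def pvDeps (r c : Nat) : List (Nat × Nat) :=
  (if 0 < r then [(r - 1, c)] else []) ++ (if 0 < c then [(r, c - 1)] else [])

-- one iteration of Source B's while loop, branches in Source B's order. Source B's stack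
-- grows at the list END (stack[-1] is the top); the port keeps the top at the
-- list HEAD, so 'stack.extend(missing)' becomes 'missing.reverse ++ stack'
-- (identical processing order). The getD defaults are never reached: they sit
-- behind the 'all deps memoized' test.
def pvStep (g : Nat → Nat → Int)
    (st : List (Nat × Nat) × PySem.Dict (Nat × Nat) (Int × Int)) :
    List (Nat × Nat) × PySem.Dict (Nat × Nat) (Int × Int) :=
  match st with
  | ([], memo) => ([], memo)
  | ((r, c) :: rest, memo) =>
    if (memo.get? (r, c)).isSome then (rest, memo)
    else if r = 0 ∧ c = 0 then (rest, memo.insert (0, 0) (g 0 0, g 0 0))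
    else
      let deps := pvDeps r c
      let missing := deps.filter (fun d => (memo.get? d).isNone)
      if missing ≠ [] then (missing.reverse ++ (r, c) :: rest, memo)
      else
        let vals := deps.map (fun d => (memo.get? d).getD (0, 0))
        let hi := ((vals.map Prod.fst).max?).getD 0
        let lo := ((vals.map Prod.snd).min?).getD 0
        let gv := g r c
        (rest, memo.insert (r, c) (if gv < 0 then (lo * gv, hi * gv) else (hi * gv, lo * gv)))

-- Source B's 'while stack:' loop; the fuel argument is a totality guard only
-- (proved sufficient below), it never changes which value is computed
def pvLoop (g : Nat → Nat → Int) :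
    Nat → List (Nat × Nat) × PySem.Dict (Nat × Nat) (Int × Int) →
    List (Nat × Nat) × PySem.Dict (Nat × Nat) (Int × Int)
  | 0, st => st
  | f + 1, st => if st.1 = [] then st else pvLoop g f (pvStep g st)

def solution_1078_5_alt (grid : List (List Int)) : Int :=
  let numRows := grid.length
  let numCols := grid.headI.length
  let final := pvLoop (pvGet2 grid) (4 ^ (numRows + numCols))
    ([(numRows - 1, numCols - 1)], PySem.Dict.empty)
  let best := ((final.2.get? (numRows - 1, numCols - 1)).getD (0, 0)).1
  if best ≥ 0 then PySem.Int.mod best 1000000007 else -1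

-- ===== PRECONDITION & SPEC =====
-- Pre_ excludes exactly the inputs on which A raises IndexError: the empty grid, an empty
-- first row, and grids with some row shorter than the first row.
def Pre_solution_1078_5 (grid : List (List Int)) : Prop :=
  grid ≠ [] ∧ grid.headI ≠ [] ∧ ∀ row ∈ grid, grid.headI.length ≤ row.length
instance (grid : List (List Int)) : Decidable (Pre_solution_1078_5 grid) := by
  unfold Pre_solution_1078_5; infer_instance

def pvWitness_solution_1078_5 : List (List Int) := [[1, -2], [3, 4]]

def Spec_solution_1078_5 (grid : List (List Int)) (out : Int) : Prop := out = solution_1078_5_alt grid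
instance (grid : List (List Int)) (out : Int) : Decidable (Spec_solution_1078_5 grid out) := by unfold Spec_solution_1078_5; infer_instance

-- ===== CLAIM (what is proved, stated in full; the proofs are below) =====
def Claim_equal_solution_1078_5 : Prop := ∀ (grid : List (List Int)), Dom_solution_1078_5 grid → Pre_solution_1078_5 grid → Spec_solution_1078_5 grid (solution_1078_5 grid)

-- ===== LEMMAS AND PROOFS =====

-- The common mathematical recursion: (max, min) path-product pair at cell (r, c).
def pvF (g : Nat → Nat → Int) : Nat → Nat → Int × Int
  | 0, 0 => (g 0 0, g 0 0)
  | r+1, 0 => ((pvF g r 0).1 * g (r+1) 0, (pvF g r 0).2 * g (r+1) 0)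
  | 0, c+1 => ((pvF g 0 c).1 * g 0 (c+1), (pvF g 0 c).2 * g 0 (c+1))
  | r+1, c+1 =>
      let up := pvF g r (c+1)
      let lf := pvF g (r+1) c
      let v := g (r+1) (c+1)
      if v < 0 then (min up.2 lf.2 * v, max up.1 lf.1 * v)
      else (max up.1 lf.1 * v, min up.2 lf.2 * v)

theorem range'_concat_one (s n : Nat) : List.range' s (n+1) = List.range' s n ++ [s+n] := by
  simpa using List.range'_concat (s := s) (n := n) (step := 1)

-- ---------- table (list-of-lists) lemmas for port A ----------

def Shape (grid : List (List Int)) (t : List (List Int)) : Prop :=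
  t.length = grid.length ∧ ∀ r < grid.length, (t.getD r []).length = grid.headI.length

theorem getD_set_eq_ite' {α : Type} (l : List α) (i j : Nat) (v d : α) :
    (l.set i v).getD j d = if i = j ∧ i < l.length then v else l.getD j d := by
  simp only [List.getD, List.getElem?_set]
  split_ifs <;> simp_all <;> omega

theorem shape_set2 {grid t : List (List Int)} {r c : Nat} {v : Int} (h : Shape grid t) :
    Shape grid (pvSet2 t r c v) := by
  obtain ⟨h1, h2⟩ := h
  refine ⟨by simpa [pvSet2] using h1, fun r' hr' => ?_⟩
  simp only [pvSet2, getD_set_eq_ite']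
  split_ifs with hh
  · obtain ⟨rfl, _⟩ := hh; simpa using h2 _ hr'
  · exact h2 r' hr'

theorem get2_set2_self {t : List (List Int)} {r c : Nat} {v : Int}
    (hr : r < t.length) (hc : c < (t.getD r []).length) :
    pvGet2 (pvSet2 t r c v) r c = v := by
  unfold pvGet2 pvSet2
  rw [getD_set_eq_ite', if_pos ⟨rfl, hr⟩, getD_set_eq_ite', if_pos ⟨rfl, hc⟩]

theorem get2_set2_ne {t : List (List Int)} {r c r' c' : Nat} {v : Int}
    (h : r' ≠ r ∨ c' ≠ c) :
    pvGet2 (pvSet2 t r c v) r' c' = pvGet2 t r' c' := by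
  unfold pvGet2 pvSet2
  rw [getD_set_eq_ite']
  split_ifs with hh
  · obtain ⟨rfl, _⟩ := hh
    have hcc : c' ≠ c := by
      rcases h with h | h
      · exact absurd rfl h
      · exact h
    rw [getD_set_eq_ite', if_neg (fun hh2 => hcc hh2.1.symm)]
  · rfl

-- invariant for A's two tables: cells in region S hold the pvF values
def AInv (grid : List (List Int)) (S : Nat → Nat → Prop)
    (st : List (List Int) × List (List Int)) : Prop :=
  Shape grid st.1 ∧ Shape grid st.2 ∧
  ∀ r c, r < grid.length → c < grid.headI.length → S r c →
    pvGet2 st.1 r c = (pvF (pvGet2 grid) r c).1 ∧ pvGet2 st.2 r c = (pvF (pvGet2 grid) r c).2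

theorem shape_replicate (grid : List (List Int)) :
    Shape grid (List.replicate grid.length (List.replicate grid.headI.length (0 : Int))) := by
  refine ⟨by simp, fun r hr => ?_⟩
  rw [List.getD_eq_getElem?_getD]
  simp [hr]

theorem aInv_mono {grid : List (List Int)} {S S' : Nat → Nat → Prop}
    {st : List (List Int) × List (List Int)}
    (h : AInv grid S st) (hss : ∀ r c, S' r c → S r c) : AInv grid S' st :=
  ⟨h.1, h.2.1, fun r c hr hc hs => h.2.2 r c hr hc (hss r c hs)⟩

theorem aInv_base (grid : List (List Int)) (hn : 0 < grid.length) (hm : 0 < grid.headI.length) :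
    AInv grid (fun r c => r = 0 ∧ c = 0)
      (pvSet2 (List.replicate grid.length (List.replicate grid.headI.length 0)) 0 0 (pvGet2 grid 0 0),
       pvSet2 (List.replicate grid.length (List.replicate grid.headI.length 0)) 0 0 (pvGet2 grid 0 0)) := by
  have hsh := shape_replicate grid
  have hlen : 0 < (List.replicate grid.length (List.replicate grid.headI.length (0:Int))).length := by
    simpa using hn
  have hrow : 0 < ((List.replicate grid.length (List.replicate grid.headI.length (0:Int))).getD 0 []).length := by
    rw [hsh.2 0 hn]; exact hm
  refine ⟨shape_set2 hsh, shape_set2 hsh, ?_⟩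
  rintro r c hr hc ⟨rfl, rfl⟩
  rw [get2_set2_self hlen hrow]
  simp [pvF]

theorem aInv_colLoop (grid : List (List Int)) (hn : 0 < grid.length) (hm : 0 < grid.headI.length) :
    ∀ k, k ≤ grid.length - 1 →
    AInv grid (fun r c => c = 0 ∧ r ≤ k)
      ((List.range' 1 k).foldl (pvStepCol grid)
        (pvSet2 (List.replicate grid.length (List.replicate grid.headI.length 0)) 0 0 (pvGet2 grid 0 0),
         pvSet2 (List.replicate grid.length (List.replicate grid.headI.length 0)) 0 0 (pvGet2 grid 0 0))) := by
  intro k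
  induction k with
  | zero =>
    intro _
    exact aInv_mono (aInv_base grid hn hm) (by omega)
  | succ k ih =>
    intro hk
    have ih' := ih (by omega)
    rw [range'_concat_one, List.foldl_append, List.foldl_cons, List.foldl_nil]
    set st := (List.range' 1 k).foldl (pvStepCol grid)
      (pvSet2 (List.replicate grid.length (List.replicate grid.headI.length 0)) 0 0 (pvGet2 grid 0 0),
       pvSet2 (List.replicate grid.length (List.replicate grid.headI.length 0)) 0 0 (pvGet2 grid 0 0)) with hst
    obtain ⟨hsx, hsn, hval⟩ := ih'
    have hkn : 1 + k < grid.length := by omega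
    have hx1 : 1 + k < st.1.length := by rw [hsx.1]; exact hkn
    have hx2 : 1 + k < st.2.length := by rw [hsn.1]; exact hkn
    have hc1 : 0 < (st.1.getD (1+k) []).length := by rw [hsx.2 _ hkn]; exact hm
    have hc2 : 0 < (st.2.getD (1+k) []).length := by rw [hsn.2 _ hkn]; exact hm
    have hprev := hval k 0 (by omega) hm ⟨rfl, le_refl k⟩
    refine ⟨shape_set2 hsx, shape_set2 hsn, ?_⟩
    rintro r c hr hc ⟨rfl, hrk⟩
    simp only [pvStepCol]
    rcases Nat.lt_or_ge r (1+k) with hlt | hge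
    · have hne : r ≠ 1 + k ∨ (0:Nat) ≠ 0 := Or.inl (by omega)
      rw [get2_set2_ne hne, get2_set2_ne hne]
      exact hval r 0 hr hm ⟨rfl, by omega⟩
    · have hreq : r = 1 + k := by omega
      subst hreq
      rw [get2_set2_self hx1 hc1, get2_set2_self hx2 hc2]
      have hsub : 1 + k - 1 = k := by omega
      have h1k : 1 + k = k + 1 := by omega
      rw [hsub, hprev.1, hprev.2, h1k, pvF]
      exact ⟨rfl, rfl⟩

theorem aInv_rowLoop (grid : List (List Int)) {st : List (List Int) × List (List Int)}
    (hn : 0 < grid.length) (hm : 0 < grid.headI.length)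
    (h : AInv grid (fun r c => c = 0 ∧ r < grid.length) st) :
    ∀ j, j ≤ grid.headI.length - 1 →
    AInv grid (fun r c => (c = 0 ∧ r < grid.length) ∨ (r = 0 ∧ c ≤ j))
      ((List.range' 1 j).foldl (pvStepRow grid) st) := by
  intro j
  induction j with
  | zero =>
    intro _
    refine aInv_mono h ?_
    rintro r c (hh | ⟨rfl, hc⟩)
    · exact hh
    · exact ⟨by omega, hn⟩
  | succ j ih =>
    intro hj
    have ih' := ih (by omega)
    rw [range'_concat_one, List.foldl_append, List.foldl_cons, List.foldl_nil]
    set st' := (List.range' 1 j).foldl (pvStepRow grid) st with hst'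
    obtain ⟨hsx, hsn, hval⟩ := ih'
    have hjm : 1 + j < grid.headI.length := by omega
    have hx1 : 0 < st'.1.length := by rw [hsx.1]; exact hn
    have hx2 : 0 < st'.2.length := by rw [hsn.1]; exact hn
    have hc1 : 1 + j < (st'.1.getD 0 []).length := by rw [hsx.2 _ hn]; exact hjm
    have hc2 : 1 + j < (st'.2.getD 0 []).length := by rw [hsn.2 _ hn]; exact hjm
    have hprev := hval 0 j hn (by omega) (Or.inr ⟨rfl, le_refl j⟩)
    refine ⟨shape_set2 hsx, shape_set2 hsn, ?_⟩
    rintro r c hr hc hreg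
    simp only [pvStepRow]
    by_cases hcell : r = 0 ∧ c = 1 + j
    · obtain ⟨rfl, rfl⟩ := hcell
      rw [get2_set2_self hx1 hc1, get2_set2_self hx2 hc2]
      have hsub : 1 + j - 1 = j := by omega
      have h1j : 1 + j = j + 1 := by omega
      rw [hsub, hprev.1, hprev.2, h1j, pvF]
      exact ⟨rfl, rfl⟩
    · have hne : r ≠ 0 ∨ c ≠ 1 + j := by tauto
      rw [get2_set2_ne hne, get2_set2_ne hne]
      rcases hreg with hh | ⟨rfl, hcj⟩
      · exact hval r c hr hc (Or.inl hh)
      · have hcj' : c ≤ j := by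
          rcases Nat.lt_or_ge c (1+j) with h1 | h1
          · omega
          · exfalso; exact hne.resolve_left (by tauto) (by omega)
        exact hval 0 c hr hc (Or.inr ⟨rfl, hcj'⟩)

-- region after k interior rows have been processed
def S4 (grid : List (List Int)) (k : Nat) (r c : Nat) : Prop :=
  (c = 0 ∧ r < grid.length) ∨ (r = 0 ∧ c < grid.headI.length) ∨
  (1 ≤ r ∧ r ≤ k ∧ c < grid.headI.length)

theorem aInv_cellLoop (grid : List (List Int)) {st : List (List Int) × List (List Int)}
    (hn : 0 < grid.length) (hm : 0 < grid.headI.length) (i : Nat)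
    (hi1 : 1 ≤ i) (hi2 : i < grid.length)
    (h : AInv grid (S4 grid (i-1)) st) :
    ∀ j, j ≤ grid.headI.length - 1 →
    AInv grid (fun r c => S4 grid (i-1) r c ∨ (r = i ∧ 1 ≤ c ∧ c ≤ j))
      ((List.range' 1 j).foldl (pvStepCell grid i) st) := by
  intro j
  induction j with
  | zero =>
    intro _
    refine aInv_mono h ?_
    rintro r c (hh | ⟨_, h1, h2⟩)
    · exact hh
    · omega
  | succ j ih =>
    intro hj
    have ih' := ih (by omega)
    rw [range'_concat_one, List.foldl_append, List.foldl_cons, List.foldl_nil]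
    set st' := (List.range' 1 j).foldl (pvStepCell grid i) st with hst'
    obtain ⟨hsx, hsn, hval⟩ := ih'
    have hjm : 1 + j < grid.headI.length := by omega
    have hx1 : i < st'.1.length := by rw [hsx.1]; exact hi2
    have hx2 : i < st'.2.length := by rw [hsn.1]; exact hi2
    have hc1 : 1 + j < (st'.1.getD i []).length := by rw [hsx.2 _ hi2]; exact hjm
    have hc2 : 1 + j < (st'.2.getD i []).length := by rw [hsn.2 _ hi2]; exact hjm
    have hup : S4 grid (i-1) (i-1) (1+j) := by
      simp only [S4]; omega
    have hlf : S4 grid (i-1) i j ∨ (i = i ∧ 1 ≤ j ∧ j ≤ j) := by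
      rcases Nat.eq_zero_or_pos j with rfl | hj0
      · exact Or.inl (Or.inl ⟨rfl, hi2⟩)
      · exact Or.inr ⟨rfl, hj0, le_refl j⟩
    have hupv := hval (i-1) (1+j) (by omega) hjm (Or.inl hup)
    have hlfv := hval i j hi2 (by omega) hlf
    have hii : i - 1 + 1 = i := by omega
    have h1j : 1 + j = j + 1 := by omega
    have hFij : pvF (pvGet2 grid) i (1+j) =
        (let up := pvF (pvGet2 grid) (i-1) (1+j)
         let lf := pvF (pvGet2 grid) i j
         let v := pvGet2 grid i (1+j)
         if v < 0 then (min up.2 lf.2 * v, max up.1 lf.1 * v)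
         else (max up.1 lf.1 * v, min up.2 lf.2 * v)) := by
      conv_lhs => rw [← hii, h1j]
      rw [pvF]
      simp only [hii, h1j]
    simp only [pvStepCell, Nat.add_sub_cancel_left]
    refine ⟨?_, ?_, ?_⟩
    · split_ifs <;> exact shape_set2 hsx
    · split_ifs <;> exact shape_set2 hsn
    · rintro r c hr hc hreg
      have hne_up : (i - 1 : Nat) ≠ i ∨ (1+j) ≠ (1+j) := Or.inl (by omega)
      have hne_lf : i ≠ i ∨ j ≠ 1 + j := Or.inr (by omega)
      by_cases hcell : r = i ∧ c = 1 + j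
      · obtain ⟨rfl, rfl⟩ := hcell
        split_ifs with hg
        · constructor
          · rw [get2_set2_self hx1 hc1, hupv.2, hlfv.2, hFij]
            simp [hg]
          · rw [get2_set2_self hx2 hc2, get2_set2_ne hne_up, get2_set2_ne hne_lf,
              hupv.1, hlfv.1, hFij]
            simp [hg]
        · constructor
          · rw [get2_set2_self hx1 hc1, hupv.1, hlfv.1, hFij]
            simp [hg]
          · rw [get2_set2_self hx2 hc2, hupv.2, hlfv.2, hFij]
            simp [hg]
      · have hne : r ≠ i ∨ c ≠ 1 + j := by tauto
        have hold : S4 grid (i-1) r c ∨ (r = i ∧ 1 ≤ c ∧ c ≤ j) := by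
          simp only [S4] at hreg ⊢
          omega
        split_ifs with hg <;>
          (rw [get2_set2_ne hne, get2_set2_ne hne]; exact hval r c hr hc hold)

theorem aInv_irowLoop (grid : List (List Int)) {st : List (List Int) × List (List Int)}
    (hn : 0 < grid.length) (hm : 0 < grid.headI.length)
    (h : AInv grid (S4 grid 0) st) :
    ∀ k, k ≤ grid.length - 1 →
    AInv grid (S4 grid k)
      ((List.range' 1 k).foldl (pvStepIRow grid grid.headI.length) st) := by
  intro k
  induction k with
  | zero => intro _; exact h
  | succ k ih =>
    intro hk
    have ih' := ih (by omega)
    rw [range'_concat_one, List.foldl_append, List.foldl_cons, List.foldl_nil]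
    have h1k : 1 + k = k + 1 := by omega
    have hstep := aInv_cellLoop grid hn hm (1+k) (by omega) (by omega)
      (aInv_mono ih' (by intro r c hc; simp only [S4] at hc ⊢; omega))
      (grid.headI.length - 1) (le_refl _)
    rw [pvStepIRow]
    refine aInv_mono hstep ?_
    intro r c hc
    simp only [S4] at hc ⊢
    omega

-- A's final table cell equals pvF at the bottom-right corner
theorem a_corner (grid : List (List Int)) (hn : 0 < grid.length) (hm : 0 < grid.headI.length) :
    solution_1078_5 grid =
      (let res := (pvF (pvGet2 grid) (grid.length - 1) (grid.headI.length - 1)).1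
       if res ≥ 0 then PySem.Int.mod res 1000000007 else -1) := by
  have hcol := aInv_colLoop grid hn hm (grid.length - 1) (le_refl _)
  have hrow := aInv_rowLoop grid hn hm
    (aInv_mono hcol (by intro r c hc; omega))
    (grid.headI.length - 1) (le_refl _)
  have hirow := aInv_irowLoop grid hn hm
    (aInv_mono hrow (by intro r c hc; simp only [S4] at hc ⊢; omega))
    (grid.length - 1) (le_refl _)
  have hcorner : S4 grid (grid.length - 1) (grid.length - 1) (grid.headI.length - 1) := by
    simp only [S4]; omega
  have hval := hirow.2.2 (grid.length - 1) (grid.headI.length - 1)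
    (by omega) (by omega) hcorner
  simp only [solution_1078_5]
  rw [hval.1]

-- ---------- B-side lemmas ----------

-- on the first column / first row the (max,min) pair is degenerate: both components
-- are the prefix product, so the sign branch collapses to plain multiplication
theorem pvF_col0_eq (g : Nat → Nat → Int) : ∀ r, (pvF g r 0).1 = (pvF g r 0).2 := by
  intro r
  induction r with
  | zero => simp [pvF]
  | succ r ih => simp only [pvF]; rw [ih]

theorem pvF_row0_eq (g : Nat → Nat → Int) : ∀ c, (pvF g 0 c).1 = (pvF g 0 c).2 := by
  intro c
  induction c with
  | zero => simp [pvF]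
  | succ c ih => simp only [pvF]; rw [ih]

-- memo correctness and growth
def MGood (g : Nat → Nat → Int) (m : PySem.Dict (Nat × Nat) (Int × Int)) : Prop :=
  ∀ p v, m.get? p = some v → v = pvF g p.1 p.2

def MLe (m m' : PySem.Dict (Nat × Nat) (Int × Int)) : Prop :=
  ∀ k v, m.get? k = some v → m'.get? k = some v

theorem mle_refl (m : PySem.Dict (Nat × Nat) (Int × Int)) : MLe m m := fun _ _ h => h

theorem mle_trans {m1 m2 m3 : PySem.Dict (Nat × Nat) (Int × Int)}
    (h12 : MLe m1 m2) (h23 : MLe m2 m3) : MLe m1 m3 := fun k v h => h23 k v (h12 k v h)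

theorem mle_insert (m : PySem.Dict (Nat × Nat) (Int × Int)) {p : Nat × Nat}
    (v : Int × Int) (hp : m.get? p = none) : MLe m (m.insert p v) := by
  intro k w hk
  rw [PySem.Dict.get?_insert]
  split_ifs with he
  · subst he; rw [hp] at hk; exact absurd hk (by simp)
  · exact hk

theorem mgood_insert {g : Nat → Nat → Int} {m : PySem.Dict (Nat × Nat) (Int × Int)}
    {r c : Nat} (hg : MGood g m) :
    MGood g (m.insert (r, c) (pvF g r c)) := by
  intro p v hp
  rw [PySem.Dict.get?_insert] at hp
  split_ifs at hp with he
  · subst he; cases hp; rfl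
  · exact hg p v hp

theorem pvDeps_sum (r c : Nat) : ∀ p ∈ pvDeps r c, p.1 + p.2 + 1 = r + c := by
  intro p hp
  simp only [pvDeps, List.mem_append] at hp
  rcases hp with hp | hp <;> split_ifs at hp with h <;> simp at hp <;> subst hp <;> simp <;> omega

theorem pvDeps_len (r c : Nat) : (pvDeps r c).length ≤ 2 := by
  simp only [pvDeps, List.length_append]
  split_ifs <;> simp

-- the three one-step shapes of pvStep
theorem pvStep_pop (g : Nat → Nat → Int) (r c : Nat)
    (memo : PySem.Dict (Nat × Nat) (Int × Int)) (rest : List (Nat × Nat)) (v : Int × Int)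
    (hmem : memo.get? (r, c) = some v) :
    pvStep g ((r, c) :: rest, memo) = (rest, memo) := by
  simp only [pvStep, hmem, Option.isSome_some, if_true]

theorem pvStep_base (g : Nat → Nat → Int)
    (memo : PySem.Dict (Nat × Nat) (Int × Int)) (rest : List (Nat × Nat))
    (hmem : memo.get? (0, 0) = none) :
    pvStep g ((0, 0) :: rest, memo) = (rest, memo.insert (0, 0) (g 0 0, g 0 0)) := by
  simp only [pvStep, hmem, Option.isSome_none, Bool.false_eq_true, if_false, and_self, if_true]

theorem pvStep_push (g : Nat → Nat → Int) (r c : Nat)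
    (memo : PySem.Dict (Nat × Nat) (Int × Int)) (rest : List (Nat × Nat))
    (hmem : memo.get? (r, c) = none) (h0 : ¬(r = 0 ∧ c = 0))
    (hmiss : (pvDeps r c).filter (fun d => (memo.get? d).isNone) ≠ []) :
    pvStep g ((r, c) :: rest, memo) =
      (((pvDeps r c).filter (fun d => (memo.get? d).isNone)).reverse ++ (r, c) :: rest, memo) := by
  simp only [pvStep, hmem, Option.isSome_none, Bool.false_eq_true, if_false, if_neg h0,
    ne_eq, if_pos hmiss]

-- the combine step writes exactly the pvF value
theorem pvStep_combine (g : Nat → Nat → Int) (r c : Nat)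
    (memo : PySem.Dict (Nat × Nat) (Int × Int)) (rest : List (Nat × Nat))
    (h0 : ¬(r = 0 ∧ c = 0)) (hnone : memo.get? (r, c) = none)
    (hdeps : ∀ d ∈ pvDeps r c, (memo.get? d).isSome) (hg : MGood g memo) :
    pvStep g ((r, c) :: rest, memo) = (rest, memo.insert (r, c) (pvF g r c)) := by
  have hmiss : (pvDeps r c).filter (fun d => (memo.get? d).isNone) = [] := by
    rw [List.filter_eq_nil_iff]
    intro d hd
    simp only [Option.isNone_iff_eq_none]
    exact Option.isSome_iff_ne_none.mp (hdeps d hd)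
  have hstep : pvStep g ((r, c) :: rest, memo) = (rest, memo.insert (r, c)
      (let vals := (pvDeps r c).map (fun d => (memo.get? d).getD (0, 0))
       let hi := ((vals.map Prod.fst).max?).getD 0
       let lo := ((vals.map Prod.snd).min?).getD 0
       let gv := g r c
       if gv < 0 then (lo * gv, hi * gv) else (hi * gv, lo * gv))) := by
    simp only [pvStep, hnone, Option.isSome_none, Bool.false_eq_true, if_false, if_neg h0,
      hmiss, ne_eq, not_true_eq_false, if_false]
  rw [hstep]
  match r, c with
  | 0, 0 => exact absurd ⟨rfl, rfl⟩ h0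
  | rr + 1, 0 =>
    have hdeq : pvDeps (rr + 1) 0 = [(rr, 0)] := by simp [pvDeps]
    obtain ⟨v, hv⟩ := Option.isSome_iff_exists.mp (hdeps (rr, 0) (by simp [hdeq]))
    have hvF : v = pvF g rr 0 := hg (rr, 0) v hv
    subst hvF
    have hF : pvF g (rr + 1) 0 =
        ((pvF g rr 0).1 * g (rr + 1) 0, (pvF g rr 0).2 * g (rr + 1) 0) := by
      simp only [pvF]
    rw [hF]
    simp only [hdeq, List.map_cons, List.map_nil, hv, Option.getD_some,
      List.max?, List.min?, List.foldl_nil, Option.getD_some]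
    split_ifs with hgv
    · rw [pvF_col0_eq]
    · rfl
  | 0, cc + 1 =>
    have hdeq : pvDeps 0 (cc + 1) = [(0, cc)] := by simp [pvDeps]
    obtain ⟨v, hv⟩ := Option.isSome_iff_exists.mp (hdeps (0, cc) (by simp [hdeq]))
    have hvF : v = pvF g 0 cc := hg (0, cc) v hv
    subst hvF
    have hF : pvF g 0 (cc + 1) =
        ((pvF g 0 cc).1 * g 0 (cc + 1), (pvF g 0 cc).2 * g 0 (cc + 1)) := by
      simp only [pvF]
    rw [hF]
    simp only [hdeq, List.map_cons, List.map_nil, hv, Option.getD_some,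
      List.max?, List.min?, List.foldl_nil, Option.getD_some]
    split_ifs with hgv
    · rw [pvF_row0_eq]
    · rfl
  | rr + 1, cc + 1 =>
    have hdeq : pvDeps (rr + 1) (cc + 1) = [(rr, cc + 1), (rr + 1, cc)] := by simp [pvDeps]
    obtain ⟨u, hu⟩ := Option.isSome_iff_exists.mp (hdeps (rr, cc + 1) (by simp [hdeq]))
    obtain ⟨lf, hl⟩ := Option.isSome_iff_exists.mp (hdeps (rr + 1, cc) (by simp [hdeq]))
    have huF : u = pvF g rr (cc + 1) := hg _ u hu
    have hlF : lf = pvF g (rr + 1) cc := hg _ lf hl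
    subst huF; subst hlF
    have hF : pvF g (rr + 1) (cc + 1) =
        (if g (rr + 1) (cc + 1) < 0 then
          (min (pvF g rr (cc + 1)).2 (pvF g (rr + 1) cc).2 * g (rr + 1) (cc + 1),
           max (pvF g rr (cc + 1)).1 (pvF g (rr + 1) cc).1 * g (rr + 1) (cc + 1))
         else
          (max (pvF g rr (cc + 1)).1 (pvF g (rr + 1) cc).1 * g (rr + 1) (cc + 1),
           min (pvF g rr (cc + 1)).2 (pvF g (rr + 1) cc).2 * g (rr + 1) (cc + 1))) := by
      simp only [pvF]
    rw [hF]
    simp only [hdeq, List.map_cons, List.map_nil, hu, hl, Option.getD_some,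
      List.max?, List.min?, List.foldl_cons, List.foldl_nil, Option.getD_some]

-- resolving a list of cells in sequence, given a resolver for one cell
theorem resolveList (g : Nat → Nat → Int) (n : Nat)
    (IH : ∀ r c (rest : List (Nat × Nat)) memo, r + c ≤ n → MGood g memo →
      ∃ k memo', k + 2 ≤ 3 * 2 ^ n ∧
        (pvStep g)^[k] ((r, c) :: rest, memo) = (rest, memo') ∧
        MGood g memo' ∧ MLe memo memo' ∧ memo'.get? (r, c) = some (pvF g r c)) :
    ∀ (L rest : List (Nat × Nat)) memo, (∀ p ∈ L, p.1 + p.2 ≤ n) → MGood g memo →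
    ∃ k memo', k + 2 * L.length ≤ 3 * 2 ^ n * L.length ∧
      (pvStep g)^[k] (L ++ rest, memo) = (rest, memo') ∧
      MGood g memo' ∧ MLe memo memo' ∧
      ∀ p ∈ L, memo'.get? p = some (pvF g p.1 p.2) := by
  intro L
  induction L with
  | nil =>
    intro rest memo _ hg
    exact ⟨0, memo, by simp, rfl, hg, mle_refl memo, by simp⟩
  | cons p L' ihL =>
    intro rest memo hsum hg
    obtain ⟨k1, memo1, hk1, hit1, hg1, hle1, hget1⟩ :=
      IH p.1 p.2 (L' ++ rest) memo (hsum p (by simp)) hg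
    obtain ⟨k2, memo2, hk2, hit2, hg2, hle2, hget2⟩ :=
      ihL rest memo1 (fun q hq => hsum q (by simp [hq])) hg1
    refine ⟨k2 + k1, memo2, ?_, ?_, hg2, mle_trans hle1 hle2, ?_⟩
    · simp only [List.length_cons]
      have : 3 * 2 ^ n * (L'.length + 1) = 3 * 2 ^ n * L'.length + 3 * 2 ^ n := by ring
      omega
    · rw [Function.iterate_add_apply]
      have : ((p :: L') ++ rest, memo) = ((p.1, p.2) :: (L' ++ rest), memo) := by simp
      rw [this, hit1, hit2]
    · intro q hq
      rcases List.mem_cons.mp hq with rfl | hq'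
      · exact hle2 _ _ hget1
      · exact hget2 q hq'

-- resolving one cell: bounded number of steps, memo grows, stays correct
theorem resolve (g : Nat → Nat → Int) : ∀ n r c (rest : List (Nat × Nat))
    (memo : PySem.Dict (Nat × Nat) (Int × Int)), r + c ≤ n → MGood g memo →
    ∃ k memo', k + 2 ≤ 3 * 2 ^ n ∧
      (pvStep g)^[k] ((r, c) :: rest, memo) = (rest, memo') ∧
      MGood g memo' ∧ MLe memo memo' ∧ memo'.get? (r, c) = some (pvF g r c) := by
  intro n
  induction n with
  | zero =>
    intro r c rest memo hrc hg
    have hr : r = 0 := by omega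
    have hc : c = 0 := by omega
    subst hr; subst hc
    cases hmem : memo.get? (0, 0) with
    | some v =>
      refine ⟨1, memo, by norm_num, ?_, hg, mle_refl memo, ?_⟩
      · rw [Function.iterate_one, pvStep_pop g 0 0 memo rest v hmem]
      · rw [hmem, hg (0, 0) v hmem]
    | none =>
      have hF : (g 0 0, g 0 0) = pvF g 0 0 := by simp [pvF]
      refine ⟨1, memo.insert (0, 0) (g 0 0, g 0 0), by norm_num, ?_, ?_, ?_, ?_⟩
      · rw [Function.iterate_one, pvStep_base g memo rest hmem]
      · rw [hF]; exact mgood_insert hg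
      · exact mle_insert memo _ hmem
      · rw [PySem.Dict.get?_insert_self, hF]
  | succ n ihn =>
    intro r c rest memo hrc hg
    have hpow : (1 : Nat) ≤ 2 ^ n := Nat.one_le_two_pow
    have hpow2 : (2 : Nat) ^ (n + 1) = 2 * 2 ^ n := by ring
    cases hmem : memo.get? (r, c) with
    | some v =>
      refine ⟨1, memo, by omega, ?_, hg, mle_refl memo, ?_⟩
      · rw [Function.iterate_one, pvStep_pop g r c memo rest v hmem]
      · rw [hmem, hg (r, c) v hmem]
    | none =>
      by_cases h0 : r = 0 ∧ c = 0
      · obtain ⟨rfl, rfl⟩ := h0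
        have hF : (g 0 0, g 0 0) = pvF g 0 0 := by simp [pvF]
        refine ⟨1, memo.insert (0, 0) (g 0 0, g 0 0), by omega, ?_, ?_, ?_, ?_⟩
        · rw [Function.iterate_one, pvStep_base g memo rest hmem]
        · rw [hF]; exact mgood_insert hg
        · exact mle_insert memo _ hmem
        · rw [PySem.Dict.get?_insert_self, hF]
      · by_cases hmiss : (pvDeps r c).filter (fun d => (memo.get? d).isNone) = []
        · have hdeps : ∀ d ∈ pvDeps r c, (memo.get? d).isSome := by
            intro d hd
            have := (List.filter_eq_nil_iff.mp hmiss) d hd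
            rcases h : memo.get? d with _ | w
            · exfalso; rw [h] at this; simp at this
            · simp
          refine ⟨1, memo.insert (r, c) (pvF g r c), by omega, ?_,
            mgood_insert hg, mle_insert memo _ hmem, PySem.Dict.get?_insert_self _ _ _⟩
          rw [Function.iterate_one, pvStep_combine g r c memo rest h0 hmem hdeps hg]
        · -- push step, then resolve the missing deps, then one more step at (r, c)
          have hstep1 := pvStep_push g r c memo rest hmem h0 hmiss
          have hsub : ∀ p ∈ ((pvDeps r c).filter (fun d => (memo.get? d).isNone)).reverse,
              p.1 + p.2 ≤ n := by
            intro p hp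
            rw [List.mem_reverse] at hp
            have := pvDeps_sum r c p (List.mem_of_mem_filter hp)
            omega
          obtain ⟨kL, memo1, hkL, hitL, hg1, hle1, hgetL⟩ :=
            resolveList g n ihn ((pvDeps r c).filter (fun d => (memo.get? d).isNone)).reverse
              ((r, c) :: rest) memo hsub hg
          have hlen1 : 1 ≤ ((pvDeps r c).filter (fun d => (memo.get? d).isNone)).reverse.length := by
            rw [List.length_reverse]
            exact List.length_pos_of_ne_nil hmiss
          have hlen2 : ((pvDeps r c).filter (fun d => (memo.get? d).isNone)).reverse.length ≤ 2 := by
            rw [List.length_reverse]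
            exact le_trans (List.length_filter_le _ _) (pvDeps_len r c)
          have hbound : kL + 4 ≤ 3 * 2 ^ (n + 1) := by
            rcases (by omega : ((pvDeps r c).filter (fun d => (memo.get? d).isNone)).reverse.length = 1 ∨
                ((pvDeps r c).filter (fun d => (memo.get? d).isNone)).reverse.length = 2) with h1 | h1 <;>
              rw [h1] at hkL <;> omega
          have hchain : (pvStep g)^[kL + 1] ((r, c) :: rest, memo) = ((r, c) :: rest, memo1) := by
            rw [Function.iterate_add_apply, Function.iterate_one, hstep1, hitL]
          cases hmem1 : memo1.get? (r, c) with
          | some v =>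
            refine ⟨1 + (kL + 1), memo1, by omega, ?_, hg1, hle1, ?_⟩
            · rw [Function.iterate_add_apply, hchain, Function.iterate_one,
                pvStep_pop g r c memo1 rest v hmem1]
            · rw [hmem1, hg1 (r, c) v hmem1]
          | none =>
            have hdeps1 : ∀ d ∈ pvDeps r c, (memo1.get? d).isSome := by
              intro d hd
              by_cases hdm : d ∈ (pvDeps r c).filter (fun d => (memo.get? d).isNone)
              · rw [hgetL d (List.mem_reverse.mpr hdm)]; simp
              · rcases h : memo.get? d with _ | w
                · exact absurd (List.mem_filter.mpr ⟨hd, by simp [h]⟩) hdm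
                · rw [hle1 d w h]; simp
            refine ⟨1 + (kL + 1), memo1.insert (r, c) (pvF g r c), by omega, ?_,
              mgood_insert hg1, mle_trans hle1 (mle_insert memo1 _ hmem1),
              PySem.Dict.get?_insert_self _ _ _⟩
            rw [Function.iterate_add_apply, hchain, Function.iterate_one,
              pvStep_combine g r c memo1 rest h0 hmem1 hdeps1 hg1]

theorem stack_empty_fix (g : Nat → Nat → Int) :
    ∀ j (m : PySem.Dict (Nat × Nat) (Int × Int)), (pvStep g)^[j] ([], m) = ([], m) := by
  intro j m
  induction j with
  | zero => rfl
  | succ j ih => rw [Function.iterate_succ_apply, show pvStep g ([], m) = ([], m) from rfl, ih]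

theorem pvLoop_eq_iterate (g : Nat → Nat → Int) :
    ∀ f st, pvLoop g f st = (pvStep g)^[f] st := by
  intro f
  induction f with
  | zero => intro st; rfl
  | succ f ih =>
    intro st
    rw [pvLoop, Function.iterate_succ_apply]
    split_ifs with he
    · obtain ⟨s1, s2⟩ := st
      simp only at he
      subst he
      rw [show pvStep g ([], s2) = ([], s2) from rfl, stack_empty_fix]
    · exact ih (pvStep g st)

theorem b_corner (grid : List (List Int)) (hn : 0 < grid.length) (hm : 0 < grid.headI.length) :
    solution_1078_5_alt grid =
      (let res := (pvF (pvGet2 grid) (grid.length - 1) (grid.headI.length - 1)).1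
       if res ≥ 0 then PySem.Int.mod res 1000000007 else -1) := by
  have hempty : MGood (pvGet2 grid) PySem.Dict.empty := by
    intro p v hp
    rw [PySem.Dict.get?_empty] at hp
    exact absurd hp (by simp)
  obtain ⟨k, memo', hk, hit, _, _, hget⟩ :=
    resolve (pvGet2 grid) ((grid.length - 1) + (grid.headI.length - 1))
      (grid.length - 1) (grid.headI.length - 1) [] PySem.Dict.empty (le_refl _) hempty
  have hfuel : k ≤ 4 ^ (grid.length + grid.headI.length) := by
    have h3 : (grid.length - 1) + (grid.headI.length - 1) + 2 ≤ grid.length + grid.headI.length := by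
      omega
    have h4 : (2 : Nat) ^ ((grid.length - 1) + (grid.headI.length - 1) + 2) ≤
        2 ^ (grid.length + grid.headI.length) :=
      Nat.pow_le_pow_right (by norm_num) h3
    have h5 : (2 : Nat) ^ (grid.length + grid.headI.length) ≤
        4 ^ (grid.length + grid.headI.length) :=
      Nat.pow_le_pow_left (by norm_num) _
    have h2 : (2 : Nat) ^ ((grid.length - 1) + (grid.headI.length - 1) + 2) =
        4 * 2 ^ ((grid.length - 1) + (grid.headI.length - 1)) := by ring
    omega
  have hiter : (pvStep (pvGet2 grid))^[4 ^ (grid.length + grid.headI.length)]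
      ([(grid.length - 1, grid.headI.length - 1)], PySem.Dict.empty) = ([], memo') := by
    have hsplit : 4 ^ (grid.length + grid.headI.length) =
        (4 ^ (grid.length + grid.headI.length) - k) + k := by omega
    rw [hsplit, Function.iterate_add_apply, hit, stack_empty_fix]
  simp only [solution_1078_5_alt]
  rw [pvLoop_eq_iterate, hiter]
  simp only [hget, Option.getD_some]

-- ===== VERDICT (by name: the statement is the Claim_ definition above) =====
theorem solution_1078_5_spec : Claim_equal_solution_1078_5 := by
  intro grid _ hpre
  obtain ⟨h1, h2, _⟩ := hpre
  have hn : 0 < grid.length := List.length_pos_of_ne_nil h1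
  have hm : 0 < grid.headI.length := List.length_pos_of_ne_nil h2
  unfold Spec_solution_1078_5
  rw [a_corner grid hn hm, b_corner grid hn hm]
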